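-- pv_equiv track=rewrite | github.com/Mauricio-xx/eda-agents | src/eda_agents/parsers/metrics.py | _categorize_metrics
-- ===== SOURCE A (Python) =====
-- def _categorize_metrics(metrics: dict) -> list[tuple[str, dict]]:
--     """Group metrics by stage/category based on key prefixes."""
--     cats: dict[str, dict] = {
--         "Synthesis": {},
--         "Timing": {},
--         "DRC": {},
--         "LVS": {},
--         "Routing": {},
--         "Power": {},
--         "Other": {},
--     }
--     for k, v in metrics.items():
--         kl = k.lower()
--         if kl.startswith("design__instance") or kl.startswith("synthesis") or kl.startswith("design__inferred") or kl.startswith("design__lint"):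
--             cats["Synthesis"][k] = v
--         elif "timing" in kl or "wns" in kl or "tns" in kl or "slack" in kl:
--             cats["Timing"][k] = v
--         elif "drc" in kl:
--             cats["DRC"][k] = v
--         elif "lvs" in kl:
--             cats["LVS"][k] = v
--         elif "route" in kl or "wire" in kl or "antenna" in kl:
--             cats["Routing"][k] = v
--         elif "power" in kl:
--             cats["Power"][k] = v
--         else:
--             cats["Other"][k] = v
--
--     return [(name, vals) for name, vals in cats.items() if vals]
-- ===== SOURCE B (Python) =====
-- # B: table-driven group-by — classify each key once via an ordered rule table,
-- # then build the result per category by filtering; no if/elif chain, no set of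
-- # seven parallel accumulators threaded through the loop.
--
-- _RULES = [
--     ("Synthesis", True,  ("design__instance", "synthesis", "design__inferred", "design__lint")),
--     ("Timing",    False, ("timing", "wns", "tns", "slack")),
--     ("DRC",       False, ("drc",)),
--     ("LVS",       False, ("lvs",)),
--     ("Routing",   False, ("route", "wire", "antenna")),
--     ("Power",     False, ("power",)),
-- ]
--
-- _ORDER = ["Synthesis", "Timing", "DRC", "LVS", "Routing", "Power", "Other"]
--
--
-- def _classify(kl: str) -> str:
--     for name, is_prefix, pats in _RULES:
--         if any(kl.startswith(p) if is_prefix else (p in kl) for p in pats):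
--             return name
--     return "Other"
--
--
-- def _categorize_metrics(metrics: dict) -> list[tuple[str, dict]]:
--     labeled = [(k, v, _classify(k.lower())) for k, v in metrics.items()]
--     out = []
--     for name in _ORDER:
--         d = {k: v for k, v, c in labeled if c == name}
--         if d:
--             out.append((name, d))
--     return out
-- ===== Notes on version B (the rewrite author's own statement) =====
-- stated objective: alternative
-- what changed: Replaces the if/elif chain feeding seven accumulator dicts with a classify-then-group pass: an ordered rule table labels each key once, then the output is built per category by filtering the labeled list.
import Mathlib
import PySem

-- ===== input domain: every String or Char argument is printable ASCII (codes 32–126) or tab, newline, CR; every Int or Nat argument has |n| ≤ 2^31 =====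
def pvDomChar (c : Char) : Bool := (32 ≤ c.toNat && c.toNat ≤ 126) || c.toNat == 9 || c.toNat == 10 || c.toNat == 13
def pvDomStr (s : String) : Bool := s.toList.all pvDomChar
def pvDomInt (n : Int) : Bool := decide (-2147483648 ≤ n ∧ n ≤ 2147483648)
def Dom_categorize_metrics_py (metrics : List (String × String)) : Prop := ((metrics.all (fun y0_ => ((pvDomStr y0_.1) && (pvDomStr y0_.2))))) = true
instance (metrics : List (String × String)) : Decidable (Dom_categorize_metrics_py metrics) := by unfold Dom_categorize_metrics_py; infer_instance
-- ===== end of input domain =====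

-- B replaces A's if/elif chain over seven accumulator dicts by a classify-then-group pass
-- (ordered rule table labels each key once, output built per category by filtering); same cost.

-- ===== PORT A =====
-- A's `cats` is a dict literal with seven FIXED keys; ported as a seven-field record
-- (each Python branch mutates exactly one of the seven inner dicts).
structure PVCats where
  syn : PySem.Dict String String
  tim : PySem.Dict String String
  drc : PySem.Dict String String
  lvs : PySem.Dict String String
  rou : PySem.Dict String String
  pow : PySem.Dict String String
  oth : PySem.Dict String String

def pvStepA (c : PVCats) (kv : String × String) : PVCats :=
  let k := kv.1
  let v := kv.2
  let kl := PySem.Str.lower k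
  if PySem.Str.startswith kl "design__instance" || PySem.Str.startswith kl "synthesis"
      || PySem.Str.startswith kl "design__inferred" || PySem.Str.startswith kl "design__lint" then
    { c with syn := c.syn.insert k v }
  else if PySem.Str.isIn "timing" kl || PySem.Str.isIn "wns" kl
      || PySem.Str.isIn "tns" kl || PySem.Str.isIn "slack" kl then
    { c with tim := c.tim.insert k v }
  else if PySem.Str.isIn "drc" kl then
    { c with drc := c.drc.insert k v }
  else if PySem.Str.isIn "lvs" kl then
    { c with lvs := c.lvs.insert k v }
  else if PySem.Str.isIn "route" kl || PySem.Str.isIn "wire" kl || PySem.Str.isIn "antenna" kl then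
    { c with rou := c.rou.insert k v }
  else if PySem.Str.isIn "power" kl then
    { c with pow := c.pow.insert k v }
  else
    { c with oth := c.oth.insert k v }

def categorize_metrics_py (metrics : List (String × String)) : List (String × (List (String × String))) :=
  let c := metrics.foldl pvStepA
    ⟨PySem.Dict.empty, PySem.Dict.empty, PySem.Dict.empty, PySem.Dict.empty,
     PySem.Dict.empty, PySem.Dict.empty, PySem.Dict.empty⟩
  ([("Synthesis", c.syn), ("Timing", c.tim), ("DRC", c.drc), ("LVS", c.lvs),
    ("Routing", c.rou), ("Power", c.pow), ("Other", c.oth)]).filterMap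
    (fun p => if p.2.items.isEmpty then none else some (p.1, p.2.items))

-- ===== PORT B =====
def pvRules : List (String × Bool × List String) :=
  [("Synthesis", true,  ["design__instance", "synthesis", "design__inferred", "design__lint"]),
   ("Timing",    false, ["timing", "wns", "tns", "slack"]),
   ("DRC",       false, ["drc"]),
   ("LVS",       false, ["lvs"]),
   ("Routing",   false, ["route", "wire", "antenna"]),
   ("Power",     false, ["power"])]

def pvOrder : List String := ["Synthesis", "Timing", "DRC", "LVS", "Routing", "Power", "Other"]

def pvClassifyGo (kl : String) : List (String × Bool × List String) → String
  | [] => "Other"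
  | (name, isPrefix, pats) :: rest =>
    if pats.any (fun p => if isPrefix then PySem.Str.startswith kl p else PySem.Str.isIn p kl) then
      name
    else
      pvClassifyGo kl rest

def pvClassify (kl : String) : String := pvClassifyGo kl pvRules

def categorize_metrics_py_alt (metrics : List (String × String)) : List (String × (List (String × String))) :=
  let labeled := metrics.map (fun kv => (kv.1, kv.2, pvClassify (PySem.Str.lower kv.1)))
  pvOrder.filterMap (fun name =>
    let d := labeled.foldl
      (fun d t => if t.2.2 == name then d.insert t.1 t.2.1 else d) PySem.Dict.empty
    if d.items.isEmpty then none else some (name, d.items))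

-- ===== PRECONDITION & SPEC =====
def Spec_categorize_metrics_py (metrics : List (String × String)) (out : List (String × (List (String × String)))) : Prop := out = categorize_metrics_py_alt metrics
instance (metrics : List (String × String)) (out : List (String × (List (String × String)))) : Decidable (Spec_categorize_metrics_py metrics out) := by unfold Spec_categorize_metrics_py; infer_instance

-- ===== CLAIM (what is proved, stated in full; the proofs are below) =====
def Claim_equal_categorize_metrics_py : Prop := ∀ (metrics : List (String × String)), Dom_categorize_metrics_py metrics → Spec_categorize_metrics_py metrics (categorize_metrics_py metrics)

-- ===== LEMMAS AND PROOFS =====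
theorem pvClassify_eq (kl : String) : pvClassify kl =
    (if PySem.Str.startswith kl "design__instance" || PySem.Str.startswith kl "synthesis"
        || PySem.Str.startswith kl "design__inferred" || PySem.Str.startswith kl "design__lint" then "Synthesis"
     else if PySem.Str.isIn "timing" kl || PySem.Str.isIn "wns" kl
        || PySem.Str.isIn "tns" kl || PySem.Str.isIn "slack" kl then "Timing"
     else if PySem.Str.isIn "drc" kl then "DRC"
     else if PySem.Str.isIn "lvs" kl then "LVS"
     else if PySem.Str.isIn "route" kl || PySem.Str.isIn "wire" kl || PySem.Str.isIn "antenna" kl then "Routing"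
     else if PySem.Str.isIn "power" kl then "Power"
     else "Other") := by
  simp [pvClassify, pvClassifyGo, pvRules, Bool.or_assoc]
  split_ifs <;> rfl

theorem pvStepA_eq (c : PVCats) (kv : String × String) : pvStepA c kv =
    { syn := if pvClassify (PySem.Str.lower kv.1) == "Synthesis" then c.syn.insert kv.1 kv.2 else c.syn,
      tim := if pvClassify (PySem.Str.lower kv.1) == "Timing" then c.tim.insert kv.1 kv.2 else c.tim,
      drc := if pvClassify (PySem.Str.lower kv.1) == "DRC" then c.drc.insert kv.1 kv.2 else c.drc,
      lvs := if pvClassify (PySem.Str.lower kv.1) == "LVS" then c.lvs.insert kv.1 kv.2 else c.lvs,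
      rou := if pvClassify (PySem.Str.lower kv.1) == "Routing" then c.rou.insert kv.1 kv.2 else c.rou,
      pow := if pvClassify (PySem.Str.lower kv.1) == "Power" then c.pow.insert kv.1 kv.2 else c.pow,
      oth := if pvClassify (PySem.Str.lower kv.1) == "Other" then c.oth.insert kv.1 kv.2 else c.oth } := by
  by_cases h1 : (PySem.Str.startswith (PySem.Str.lower kv.1) "design__instance"
      || PySem.Str.startswith (PySem.Str.lower kv.1) "synthesis"
      || PySem.Str.startswith (PySem.Str.lower kv.1) "design__inferred"
      || PySem.Str.startswith (PySem.Str.lower kv.1) "design__lint") = true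
  · have hc : pvClassify (PySem.Str.lower kv.1) = "Synthesis" := by rw [pvClassify_eq]; simp_all
    simp_all [pvStepA]
  · by_cases h2 : (PySem.Str.isIn "timing" (PySem.Str.lower kv.1) || PySem.Str.isIn "wns" (PySem.Str.lower kv.1)
        || PySem.Str.isIn "tns" (PySem.Str.lower kv.1) || PySem.Str.isIn "slack" (PySem.Str.lower kv.1)) = true
    · have hc : pvClassify (PySem.Str.lower kv.1) = "Timing" := by rw [pvClassify_eq]; simp_all
      simp_all [pvStepA]
    · by_cases h3 : PySem.Str.isIn "drc" (PySem.Str.lower kv.1) = true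
      · have hc : pvClassify (PySem.Str.lower kv.1) = "DRC" := by rw [pvClassify_eq]; simp_all
        simp_all [pvStepA]
      · by_cases h4 : PySem.Str.isIn "lvs" (PySem.Str.lower kv.1) = true
        · have hc : pvClassify (PySem.Str.lower kv.1) = "LVS" := by rw [pvClassify_eq]; simp_all
          simp_all [pvStepA]
        · by_cases h5 : (PySem.Str.isIn "route" (PySem.Str.lower kv.1) || PySem.Str.isIn "wire" (PySem.Str.lower kv.1)
              || PySem.Str.isIn "antenna" (PySem.Str.lower kv.1)) = true
          · have hc : pvClassify (PySem.Str.lower kv.1) = "Routing" := by rw [pvClassify_eq]; simp_all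
            simp_all [pvStepA]
          · by_cases h6 : PySem.Str.isIn "power" (PySem.Str.lower kv.1) = true
            · have hc : pvClassify (PySem.Str.lower kv.1) = "Power" := by rw [pvClassify_eq]; simp_all
              simp_all [pvStepA]
            · have hc : pvClassify (PySem.Str.lower kv.1) = "Other" := by rw [pvClassify_eq]; simp_all
              simp_all [pvStepA]

theorem pv_fold_proj : ∀ (ms : List (String × String)) (c : PVCats),
    ms.foldl pvStepA c = {
      syn := ms.foldl (fun d p => if pvClassify (PySem.Str.lower p.1) == "Synthesis" then d.insert p.1 p.2 else d) c.syn,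
      tim := ms.foldl (fun d p => if pvClassify (PySem.Str.lower p.1) == "Timing" then d.insert p.1 p.2 else d) c.tim,
      drc := ms.foldl (fun d p => if pvClassify (PySem.Str.lower p.1) == "DRC" then d.insert p.1 p.2 else d) c.drc,
      lvs := ms.foldl (fun d p => if pvClassify (PySem.Str.lower p.1) == "LVS" then d.insert p.1 p.2 else d) c.lvs,
      rou := ms.foldl (fun d p => if pvClassify (PySem.Str.lower p.1) == "Routing" then d.insert p.1 p.2 else d) c.rou,
      pow := ms.foldl (fun d p => if pvClassify (PySem.Str.lower p.1) == "Power" then d.insert p.1 p.2 else d) c.pow,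
      oth := ms.foldl (fun d p => if pvClassify (PySem.Str.lower p.1) == "Other" then d.insert p.1 p.2 else d) c.oth } := by
  intro ms
  induction ms with
  | nil => intro c; rfl
  | cons hd tl ih =>
    intro c
    rw [List.foldl_cons, pvStepA_eq, ih]
    simp only [List.foldl_cons]

-- ===== VERDICT (by name: the statement is the Claim_ definition above) =====
theorem categorize_metrics_py_spec : Claim_equal_categorize_metrics_py := by
  intro metrics _
  unfold Spec_categorize_metrics_py categorize_metrics_py categorize_metrics_py_alt
  rw [pv_fold_proj]
  simp only [pvOrder, List.foldl_map]
  rfl
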